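-- pv_equiv track=rewrite | github.com/nfernan1/speedreader | Google Drive/Documents/Class/2013/ICS 33/Solutions copy/inlabexam1students/Lab 1/ZengChenjunni/exam.py | find_influencers
-- ===== SOURCE A (Python) =====
-- from math        import ceil
--
-- def find_influencers(graph):
--     infl = dict()
--     for k,v in graph.items():
--         infl[k] = len(tuple(v))-ceil(len(tuple(v))/2)
--     while True:
--         cand = [(infl[i],len(graph[i]),i) for i in infl.keys() if infl[i]>=0]
--         if cand == []:
--             return set(infl.keys())
--         com = cand[0]
--         for i in cand[1:]:
--             if i[0]<com[0] or (i[0] == com[0] and i[1]<com[1]) or (i[0] == com[0] and i[1] == com[1] and i[2]<com[2]):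
--                 com = tuple(i)
--         infl.pop(com[2])
--         for k,v in infl.items():
--             if com[2] in graph[k]:
--                 infl[k] = v-1
-- ===== SOURCE B (Python) =====
-- def find_influencers(graph):
--     infl = {k: len(v) // 2 for k, v in graph.items()}
--     deg = {k: len(v) for k, v in graph.items()}
--     rev = {}
--     for k, v in graph.items():
--         for t in set(v):
--             rev.setdefault(t, []).append(k)
--     while True:
--         com = min(((f, deg[k], k) for k, f in infl.items() if f >= 0), default=None)
--         if com is None:
--             return set(infl)
--         del infl[com[2]]
--         for j in rev.get(com[2], ()):
--             if j in infl:
--                 infl[j] -= 1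
-- ===== Notes on version B (the rewrite author's own statement) =====
-- stated objective: faster
-- what changed: B precomputes a reverse-adjacency index and a degree table once, so each elimination round decrements only the O(1)-looked-up predecessors of the removed node instead of rescanning every remaining node's adjacency list; the running minimum is taken with builtin min over (infl, deg, id) triples.
import Mathlib
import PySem

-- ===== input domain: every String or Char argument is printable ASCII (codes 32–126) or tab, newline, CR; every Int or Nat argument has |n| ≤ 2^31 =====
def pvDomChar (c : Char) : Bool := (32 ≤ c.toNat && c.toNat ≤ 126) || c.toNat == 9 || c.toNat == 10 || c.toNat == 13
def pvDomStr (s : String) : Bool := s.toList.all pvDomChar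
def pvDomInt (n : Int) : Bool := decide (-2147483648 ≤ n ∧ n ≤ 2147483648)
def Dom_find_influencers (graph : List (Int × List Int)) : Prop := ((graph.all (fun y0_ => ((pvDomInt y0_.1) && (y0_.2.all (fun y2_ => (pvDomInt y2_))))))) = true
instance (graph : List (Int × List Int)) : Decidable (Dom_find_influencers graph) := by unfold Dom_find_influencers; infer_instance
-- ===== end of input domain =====

-- B replaces A's per-round scan of every remaining adjacency list by a reverse-adjacency index
-- built once (and a precomputed degree table), for a measured speed-up; return values are equal.


-- ===== PORT A =====
-- math.ceil(n/2) for an integer n (exact here: |n| ≤ 2^31, so n/2 is an exact dyadic float)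
def pvCeilHalf (n : Int) : Int := -(PySem.Int.floordiv (-n) 2)

-- the 'while True' loop of A; fuel bounds the iteration count (each non-returning pass removes
-- one key of infl, so infl.size + 1 iterations always suffice; the fuel-0 branch is unreachable)
def pvLoopA (graph : PySem.Dict Int (List Int)) : Nat → PySem.Dict Int Int → List Int
  | 0, infl => PySem.Set.ofList infl.keys
  | fuel+1, infl =>
    let cand : List (Int × Int × Int) :=
      (infl.keys.filter (fun i => decide (0 ≤ infl.getD i 0))).map
        (fun i => (infl.getD i 0, ((graph.getD i []).length : Int), i))
    match cand with
    | [] => PySem.Set.ofList infl.keys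
    | c0 :: rest =>
      let com := rest.foldl (fun com i =>
        if i.1 < com.1 ∨ (i.1 = com.1 ∧ i.2.1 < com.2.1) ∨
           (i.1 = com.1 ∧ i.2.1 = com.2.1 ∧ i.2.2 < com.2.2) then i else com) c0
      let infl1 := infl.erase com.2.2
      let infl2 := infl1.items.foldl (fun d kv =>
        if (graph.getD kv.1 []).contains com.2.2 then d.insert kv.1 (kv.2 - 1) else d) infl1
      pvLoopA graph fuel infl2

def find_influencers (graph : List (Int × List Int)) : List Int :=
  let infl : PySem.Dict Int Int :=
    graph.foldl (fun d kv =>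
      d.insert kv.1 ((kv.2.length : Int) - pvCeilHalf (kv.2.length : Int))) ⟨[]⟩
  pvLoopA ⟨graph⟩ (infl.items.length + 1) infl

-- ===== PORT B =====
-- Python '<' on int triples (lexicographic)
def pvTripleLt (a b : Int × Int × Int) : Bool :=
  a.1 < b.1 || (a.1 == b.1 && (a.2.1 < b.2.1 || (a.2.1 == b.2.1 && a.2.2 < b.2.2)))

-- builtin min over int triples, first minimum (exact hand port of Python's min)
def pvMinTriple? (l : List (Int × Int × Int)) : Option (Int × Int × Int) :=
  match l with
  | [] => none
  | c :: rest => some (rest.foldl (fun m t => if pvTripleLt t m then t else m) c)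

-- the 'while True' loop of B; same fuel convention as pvLoopA
def pvLoopB (rev : PySem.Dict Int (List Int)) (deg : PySem.Dict Int Int) :
    Nat → PySem.Dict Int Int → List Int
  | 0, infl => PySem.Set.ofList infl.keys
  | fuel+1, infl =>
    match pvMinTriple? (infl.items.filterMap (fun kv =>
        if 0 ≤ kv.2 then some (kv.2, deg.getD kv.1 0, kv.1) else none)) with
    | none => PySem.Set.ofList infl.keys
    | some com =>
      let infl1 := infl.erase com.2.2
      let infl2 := (rev.getD com.2.2 []).foldl
        (fun d j => if d.contains j then d.modify j 0 (fun v => v - 1) else d) infl1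
      pvLoopB rev deg fuel infl2

def find_influencers_alt (graph : List (Int × List Int)) : List Int :=
  let infl : PySem.Dict Int Int :=
    graph.foldl (fun d kv => d.insert kv.1 (PySem.Int.floordiv (kv.2.length : Int) 2)) ⟨[]⟩
  let deg : PySem.Dict Int Int :=
    graph.foldl (fun d kv => d.insert kv.1 (kv.2.length : Int)) ⟨[]⟩
  let rev : PySem.Dict Int (List Int) :=
    graph.foldl (fun r kv =>
      (PySem.Set.ofList kv.2).foldl (fun r t => r.modify t [] (fun l => l ++ [kv.1])) r) ⟨[]⟩
  pvLoopB rev deg (infl.items.length + 1) infl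

-- ===== PRECONDITION & SPEC =====
-- Pre_ excludes association lists with duplicate keys: the Python parameter is a dict, which
-- cannot hold duplicate keys, so such lists do not represent any input A actually receives.
def Pre_find_influencers (graph : List (Int × List Int)) : Prop :=
  (graph.map Prod.fst).Nodup
instance (graph : List (Int × List Int)) : Decidable (Pre_find_influencers graph) := by
  unfold Pre_find_influencers; infer_instance

def pvWitness_find_influencers : (List (Int × List Int)) := [(0, [1, 2]), (1, [0]), (2, [])]

def Spec_find_influencers (graph : List (Int × List Int)) (out : List Int) : Prop := out = find_influencers_alt graph
instance (graph : List (Int × List Int)) (out : List Int) : Decidable (Spec_find_influencers graph out) := by unfold Spec_find_influencers; infer_instance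

-- ===== CLAIM (what is proved, stated in full; the proofs are below) =====
def Claim_equal_find_influencers : Prop := ∀ (graph : List (Int × List Int)), Dom_find_influencers graph → Pre_find_influencers graph → Spec_find_influencers graph (find_influencers graph)


-- ===== LEMMAS AND PROOFS =====

-- proof-side names for the dictionaries the two ports build
def pvInflA (graph : List (Int × List Int)) : PySem.Dict Int Int :=
  graph.foldl (fun d kv =>
    d.insert kv.1 ((kv.2.length : Int) - pvCeilHalf (kv.2.length : Int))) ⟨[]⟩
def pvInflB (graph : List (Int × List Int)) : PySem.Dict Int Int :=
  graph.foldl (fun d kv => d.insert kv.1 (PySem.Int.floordiv (kv.2.length : Int) 2)) ⟨[]⟩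
def pvDeg (graph : List (Int × List Int)) : PySem.Dict Int Int :=
  graph.foldl (fun d kv => d.insert kv.1 ((kv.2.length : Int))) ⟨[]⟩
def pvRev (graph : List (Int × List Int)) : PySem.Dict Int (List Int) :=
  graph.foldl (fun r kv =>
    (PySem.Set.ofList kv.2).foldl (fun r t => r.modify t [] (fun l => l ++ [kv.1])) r) ⟨[]⟩

lemma pv_half (n : Nat) : (n : Int) - pvCeilHalf (n : Int) = PySem.Int.floordiv (n : Int) 2 := by
  unfold pvCeilHalf PySem.Int.floordiv
  rw [Int.fdiv_eq_ediv, Int.fdiv_eq_ediv]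
  simp only [show ((0:Int) ≤ 2 ∨ (2:Int) ∣ -(n:Int)) = True from by simp, if_true,
    show ((0:Int) ≤ 2 ∨ (2:Int) ∣ (n:Int)) = True from by simp, if_true]
  omega

lemma pv_infl_eq (graph : List (Int × List Int)) : pvInflA graph = pvInflB graph := by
  unfold pvInflA pvInflB
  simp only [pv_half]

lemma pv_inflB_items (graph : List (Int × List Int)) (hg : (graph.map Prod.fst).Nodup) :
    (pvInflB graph).items = graph.map (fun kv => (kv.1, PySem.Int.floordiv (kv.2.length : Int) 2)) := by
  unfold pvInflB
  rw [PySem.Dict.items_foldl_insert_fresh graph Prod.fst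
    (fun kv => PySem.Int.floordiv (kv.2.length : Int) 2) ⟨[]⟩
    (by intro a _; rfl) hg]
  rfl

lemma pv_deg_items (graph : List (Int × List Int)) (hg : (graph.map Prod.fst).Nodup) :
    (pvDeg graph).items = graph.map (fun kv => (kv.1, (kv.2.length : Int))) := by
  unfold pvDeg
  rw [PySem.Dict.items_foldl_insert_fresh graph Prod.fst
    (fun kv => ((kv.2.length : Int))) ⟨[]⟩ (by intro a _; rfl) hg]
  rfl

lemma pv_get?_map (l : List (Int × List Int)) (g : List Int → Int) (k : Int) :
    (PySem.Dict.mk (l.map (fun kv => (kv.1, g kv.2)))).get? k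
      = ((PySem.Dict.mk l).get? k).map g := by
  induction l with
  | nil => rfl
  | cons a t ih =>
    simp only [List.map_cons]
    rw [PySem.Dict.get?_mk_cons, PySem.Dict.get?_mk_cons]
    by_cases h : (a.1 == k) = true
    · simp [h]
    · simp only [Bool.not_eq_true] at h
      simp [h, ih]

lemma pv_deg_getD (graph : List (Int × List Int)) (hg : (graph.map Prod.fst).Nodup)
    (k : Int) (hk : k ∈ graph.map Prod.fst) :
    (pvDeg graph).getD k 0 = (((PySem.Dict.mk graph).getD k []).length : Int) := by
  have he : pvDeg graph = PySem.Dict.mk (graph.map (fun kv => (kv.1, (kv.2.length : Int)))) :=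
    PySem.Dict.ext (pv_deg_items graph hg)
  rw [he]
  simp only [PySem.Dict.getD]
  rw [pv_get?_map graph (fun v => ((v.length : Int))) k]
  cases ho : (PySem.Dict.mk graph).get? k with
  | none =>
    exfalso
    have := (PySem.Dict.get?_eq_none_iff_not_mem_keys _ k).mp ho
    rw [PySem.Dict.keys_mk] at this
    exact this hk
  | some v => simp

lemma pv_filter_ofList (v : List Int) (c : Int) :
    (PySem.Set.ofList v).filter (fun t => t == c) = if c ∈ v then [c] else [] := by
  rw [List.filter_beq]
  by_cases h : c ∈ v
  · rw [List.count_eq_one_of_mem (PySem.Set.nodup_ofList v) ((PySem.Set.mem_ofList v c).mpr h)]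
    simp [h]
  · have hc : c ∉ PySem.Set.ofList v := by rw [PySem.Set.mem_ofList]; exact h
    rw [List.count_eq_zero_of_not_mem hc]
    simp [h]

lemma pv_inner (k c : Int) (v : List Int) :
    (((PySem.Set.ofList v).map (fun t => (t, k))).filter (fun p => p.1 == c)).map
        (fun p : Int × Int => p.2)
      = if c ∈ v then [k] else [] := by
  rw [List.filter_map]
  have h1 : ((fun p : Int × Int => p.1 == c) ∘ (fun t => (t, k))) = fun t => t == c := rfl
  rw [h1, pv_filter_ofList]
  by_cases h : c ∈ v <;> simp [h]

lemma pv_foldl_flatMap {α β δ : Type} (l : List α) (g : α → List β) (step : δ → β → δ) :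
    ∀ (init : δ), (l.flatMap g).foldl step init
      = l.foldl (fun d a => (g a).foldl step d) init := by
  induction l with
  | nil => intro init; rfl
  | cons a t ih => intro init; simp only [List.flatMap_cons, List.foldl_append, List.foldl_cons, ih]

lemma pv_flat_filter (graph : List (Int × List Int)) (c : Int) :
    graph.flatMap (fun a =>
        (((PySem.Set.ofList a.2).map (fun t => (t, a.1))).filter (fun p => p.1 == c)).map
          (fun p : Int × Int => p.2))
      = (graph.filter (fun kv => kv.2.contains c)).map Prod.fst := by
  induction graph with
  | nil => rfl
  | cons a t ih =>
    rw [List.flatMap_cons, pv_inner, ih, List.filter_cons]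
    by_cases h : c ∈ a.2
    · simp [h]
    · simp [h]

lemma pv_rev_getD (graph : List (Int × List Int)) (c : Int) :
    (pvRev graph).getD c [] = (graph.filter (fun kv => kv.2.contains c)).map Prod.fst := by
  unfold pvRev
  have h1 : graph.foldl (fun r kv =>
        (PySem.Set.ofList kv.2).foldl (fun r t => r.modify t [] (fun l => l ++ [kv.1])) r)
        (⟨[]⟩ : PySem.Dict Int (List Int))
      = (graph.flatMap (fun kv => (PySem.Set.ofList kv.2).map (fun t => (t, kv.1)))).foldl
          (fun d p => d.modify p.1 [] (fun l => l ++ [p.2])) ⟨[]⟩ := by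
    rw [pv_foldl_flatMap]
    congr 1
    funext d kv
    rw [List.foldl_map]
  rw [h1, PySem.Dict.getD_foldl_modify_append]
  have h2 : (⟨[]⟩ : PySem.Dict Int (List Int)).getD c [] = [] := rfl
  rw [h2, List.nil_append, List.filter_flatMap, List.map_flatMap]
  exact pv_flat_filter graph c

lemma pv_mem_rev (graph : List (Int × List Int)) (hg : (graph.map Prod.fst).Nodup)
    (k : Int) (hk : k ∈ graph.map Prod.fst) (c : Int) :
    (k ∈ (graph.filter (fun kv => kv.2.contains c)).map Prod.fst)
      ↔ c ∈ (PySem.Dict.mk graph).getD k [] := by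
  have hnd : (PySem.Dict.mk graph).keys.Nodup := by rw [PySem.Dict.keys_mk]; exact hg
  obtain ⟨v, hv⟩ : ∃ v, (PySem.Dict.mk graph).get? k = some v := by
    cases ho : (PySem.Dict.mk graph).get? k with
    | none =>
      exfalso
      have := (PySem.Dict.get?_eq_none_iff_not_mem_keys _ k).mp ho
      rw [PySem.Dict.keys_mk] at this
      exact this hk
    | some v => exact ⟨v, rfl⟩
  have hgd : (PySem.Dict.mk graph).getD k [] = v := by simp [PySem.Dict.getD, hv]
  rw [hgd]
  constructor
  · intro hmem
    rw [List.mem_map] at hmem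
    obtain ⟨kv, hkvmem, hfst⟩ := hmem
    rw [List.mem_filter] at hkvmem
    obtain ⟨hmem2, hcond⟩ := hkvmem
    have hsome : (PySem.Dict.mk graph).get? kv.1 = some kv.2 :=
      PySem.Dict.get?_of_mem_items _ (by exact hmem2) hnd
    rw [hfst, hv] at hsome
    cases hsome
    exact List.contains_iff_mem.mp hcond
  · intro hc
    have hkv : (k, v) ∈ graph := PySem.Dict.mem_items_of_get?_eq_some _ hv
    rw [List.mem_map]
    exact ⟨(k, v), List.mem_filter.mpr ⟨hkv, List.contains_iff_mem.mpr hc⟩, rfl⟩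

lemma pv_cand_aux (graph : List (Int × List Int)) (infl : PySem.Dict Int Int) :
    ∀ (m : List (Int × Int)),
      (∀ kv ∈ m, infl.getD kv.1 0 = kv.2 ∧
        (pvDeg graph).getD kv.1 0 = (((PySem.Dict.mk graph).getD kv.1 []).length : Int)) →
      ((m.map Prod.fst).filter (fun i => decide (0 ≤ infl.getD i 0))).map
          (fun i => (infl.getD i 0, (((PySem.Dict.mk graph).getD i []).length : Int), i))
        = m.filterMap (fun kv =>
            if 0 ≤ kv.2 then some (kv.2, (pvDeg graph).getD kv.1 0, kv.1) else none) := by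
  intro m
  induction m with
  | nil => intro _; rfl
  | cons kv t ih =>
    intro h
    have h1 := (h kv (List.mem_cons_self)).1
    have h2 := (h kv (List.mem_cons_self)).2
    rw [List.map_cons, List.filter_cons, List.filterMap_cons]
    by_cases hp : 0 ≤ kv.2
    · rw [if_pos hp]
      have : decide (0 ≤ infl.getD kv.1 0) = true := by rw [h1]; exact decide_eq_true hp
      rw [this, if_pos rfl, List.map_cons, h1, h2,
        ih (fun p hp2 => h p (List.mem_cons_of_mem _ hp2))]
    · rw [if_neg hp]
      have : decide (0 ≤ infl.getD kv.1 0) = false := by rw [h1]; exact decide_eq_false hp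
      rw [this]
      simp only [Bool.false_eq_true, if_false]
      exact ih (fun p hp2 => h p (List.mem_cons_of_mem _ hp2))

lemma pv_lt_iff (a b : Int × Int × Int) :
    pvTripleLt a b = true ↔
      (a.1 < b.1 ∨ (a.1 = b.1 ∧ a.2.1 < b.2.1) ∨ (a.1 = b.1 ∧ a.2.1 = b.2.1 ∧ a.2.2 < b.2.2)) := by
  unfold pvTripleLt
  simp only [Bool.or_eq_true, Bool.and_eq_true, decide_eq_true_eq, beq_iff_eq]
  tauto

lemma pv_min_eq (c0 : Int × Int × Int) (rest : List (Int × Int × Int)) :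
    rest.foldl (fun com i =>
      if i.1 < com.1 ∨ (i.1 = com.1 ∧ i.2.1 < com.2.1) ∨
         (i.1 = com.1 ∧ i.2.1 = com.2.1 ∧ i.2.2 < com.2.2) then i else com) c0
      = rest.foldl (fun m t => if pvTripleLt t m then t else m) c0 := by
  have hf : (fun (com i : Int × Int × Int) =>
      if i.1 < com.1 ∨ (i.1 = com.1 ∧ i.2.1 < com.2.1) ∨
         (i.1 = com.1 ∧ i.2.1 = com.2.1 ∧ i.2.2 < com.2.2) then i else com)
      = fun m t => if pvTripleLt t m then t else m := by
    funext com i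
    by_cases h : pvTripleLt i com = true
    · rw [if_pos h, if_pos ((pv_lt_iff i com).mp h)]
    · rw [if_neg h, if_neg (fun hp => h ((pv_lt_iff i com).mpr hp))]
  rw [hf]

lemma pv_foldl_min_mem (rest : List (Int × Int × Int)) :
    ∀ (c0 : Int × Int × Int),
      rest.foldl (fun m t => if pvTripleLt t m then t else m) c0 ∈ c0 :: rest := by
  induction rest with
  | nil => intro c0; exact List.mem_cons_self
  | cons a t ih =>
    intro c0
    rw [List.foldl_cons]
    by_cases h : pvTripleLt a c0 = true
    · rw [if_pos h]
      exact List.mem_cons_of_mem _ (ih a)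
    · rw [if_neg h]
      rcases List.mem_cons.mp (ih c0) with h2 | h2
      · rw [h2]; exact List.mem_cons_self
      · exact List.mem_cons_of_mem _ (List.mem_cons_of_mem _ h2)

lemma pv_map_noop (k w : Int) (l : List (Int × Int)) (hl : ∀ p ∈ l, p.1 ≠ k) :
    l.map (fun p => if p.1 == k then (k, w) else p) = l := by
  induction l with
  | nil => rfl
  | cons a t ih =>
    rw [List.map_cons, if_neg (by simp [hl a List.mem_cons_self]),
      ih (fun p hp => hl p (List.mem_cons_of_mem _ hp))]

lemma pv_foldA (q : Int → Bool) :
    ∀ (m pre : List (Int × Int)), ((pre ++ m).map Prod.fst).Nodup →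
    (m.foldl (fun d kv => if q kv.1 then d.insert kv.1 (kv.2 - 1) else d)
        (PySem.Dict.mk (pre ++ m))).items
      = pre ++ m.map (fun kv => if q kv.1 then (kv.1, kv.2 - 1) else kv) := by
  intro m
  induction m with
  | nil => intro pre h; simp
  | cons kv t ih =>
    intro pre h
    have h' := h
    rw [List.map_append, List.map_cons] at h'
    obtain ⟨hnp, hnc, hdisj⟩ := List.nodup_append.mp h'
    have ht : ∀ p ∈ t, p.1 ≠ kv.1 := by
      intro p hp heq
      exact (List.nodup_cons.mp hnc).1 (heq ▸ List.mem_map_of_mem hp)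
    have hpre : ∀ p ∈ pre, p.1 ≠ kv.1 := by
      intro p hp heq
      exact hdisj p.1 (List.mem_map_of_mem hp) kv.1 (List.mem_cons_self) heq
    rw [List.foldl_cons]
    by_cases hq : q kv.1 = true
    · rw [if_pos hq]
      have hc : (PySem.Dict.mk (pre ++ kv :: t)).contains kv.1 = true := by
        simp only [PySem.Dict.contains, List.any_eq_true]
        exact ⟨kv, List.mem_append_right _ List.mem_cons_self, by simp⟩
      have hd : (PySem.Dict.mk (pre ++ kv :: t)).insert kv.1 (kv.2 - 1)
          = PySem.Dict.mk ((pre ++ [(kv.1, kv.2 - 1)]) ++ t) := by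
        apply PySem.Dict.ext
        rw [PySem.Dict.items_insert_of_contains _ _ hc]
        show (pre ++ kv :: t).map (fun p => if p.1 == kv.1 then (kv.1, kv.2 - 1) else p) = _
        rw [List.map_append, List.map_cons, pv_map_noop _ _ _ hpre, pv_map_noop _ _ _ ht]
        simp
      rw [hd]
      have hnodup2 : (((pre ++ [(kv.1, kv.2 - 1)]) ++ t).map Prod.fst).Nodup := by
        have : ((pre ++ [(kv.1, kv.2 - 1)]) ++ t).map Prod.fst
            = (pre ++ kv :: t).map Prod.fst := by simp
        rw [this]; exact h
      rw [ih _ hnodup2, List.map_cons, if_pos hq]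
      simp
    · rw [if_neg hq]
      have heq : PySem.Dict.mk (pre ++ kv :: t) = PySem.Dict.mk ((pre ++ [kv]) ++ t) := by
        apply PySem.Dict.ext; simp
      have hnodup2 : (((pre ++ [kv]) ++ t).map Prod.fst).Nodup := by
        have : ((pre ++ [kv]) ++ t).map Prod.fst = (pre ++ kv :: t).map Prod.fst := by simp
        rw [this]; exact h
      rw [heq, ih _ hnodup2, List.map_cons, if_neg hq]
      simp

lemma pv_foldB :
    ∀ (R : List Int) (d : PySem.Dict Int Int), R.Nodup → d.keys.Nodup →
    (R.foldl (fun d j => if d.contains j then d.modify j 0 (fun v => v - 1) else d) d).items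
      = d.items.map (fun kv => if R.contains kv.1 then (kv.1, kv.2 - 1) else kv) := by
  intro R
  induction R with
  | nil => intro d _ _; simp
  | cons j R' ih =>
    intro d hR hd
    have hjR' : j ∉ R' := (List.nodup_cons.mp hR).1
    rw [List.foldl_cons]
    by_cases hc : d.contains j = true
    · rw [if_pos hc]
      have hitems : (d.modify j 0 (fun v => v - 1)).items
          = d.items.map (fun kv => if kv.1 == j then (kv.1, kv.2 - 1) else kv) := by
        show (d.insert j (d.getD j 0 - 1)).items = _
        rw [PySem.Dict.items_insert_of_contains _ _ hc]
        apply List.map_congr_left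
        intro p hp
        by_cases hpj : (p.1 == j) = true
        · have hp1 : p.1 = j := by simpa using hpj
          rw [if_pos hpj, if_pos hpj, ← hp1,
            PySem.Dict.getD_of_mem_items d (by exact hp) hd 0]
        · rw [if_neg hpj, if_neg hpj]
      have hkeys : (d.modify j 0 (fun v => v - 1)).keys = d.keys := by
        show (d.modify j 0 (fun v => v - 1)).items.map _ = d.items.map _
        rw [hitems, List.map_map]
        apply List.map_congr_left
        intro p _
        by_cases hpj : (p.1 == j) = true
        · simp only [Function.comp_apply, if_pos hpj]
        · simp only [Function.comp_apply, if_neg hpj]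
      rw [ih _ (List.nodup_cons.mp hR).2 (by rw [hkeys]; exact hd), hitems, List.map_map]
      apply List.map_congr_left
      intro p hp
      by_cases hpj : (p.1 == j) = true
      · have hp1 : p.1 = j := by simpa using hpj
        have hR'c : R'.contains p.1 = false := by
          rw [hp1]
          exact Bool.eq_false_iff.mpr (fun hcon => hjR' (List.contains_iff_mem.mp hcon))
        simp [hp1, hjR']
      · have hcons : (j :: R').contains p.1 = R'.contains p.1 := by
          rw [List.contains_cons, show (p.1 == j) = false from by simpa using hpj, Bool.false_or]
        simp only [Function.comp_apply, if_neg hpj, hcons]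
    · rw [if_neg hc]
      have hnotj : ∀ p ∈ d.items, p.1 ≠ j := by
        intro p hp heq
        have : d.contains j = true := by
          simp only [PySem.Dict.contains, List.any_eq_true]
          exact ⟨p, hp, by simp [heq]⟩
        rw [this] at hc; exact hc rfl
      rw [ih _ (List.nodup_cons.mp hR).2 hd]
      apply List.map_congr_left
      intro p hp
      have hcons : (j :: R').contains p.1 = R'.contains p.1 := by
        rw [List.contains_cons, show (p.1 == j) = false from by simpa using hnotj p hp,
          Bool.false_or]
      rw [hcons]

lemma pv_dec_eq (graph : List (Int × List Int)) (hg : (graph.map Prod.fst).Nodup)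
    (infl1 : PySem.Dict Int Int) (h1 : infl1.keys.Nodup)
    (hsub : ∀ k ∈ infl1.keys, k ∈ graph.map Prod.fst) (c : Int) :
    infl1.items.foldl (fun d kv =>
        if ((PySem.Dict.mk graph).getD kv.1 []).contains c then d.insert kv.1 (kv.2 - 1) else d)
        infl1
      = ((pvRev graph).getD c []).foldl
          (fun d j => if d.contains j then d.modify j 0 (fun v => v - 1) else d) infl1 := by
  have hR : (pvRev graph).getD c [] = (graph.filter (fun kv => kv.2.contains c)).map Prod.fst :=
    pv_rev_getD graph c
  have hRnd : ((pvRev graph).getD c []).Nodup := by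
    rw [hR]
    exact List.Nodup.sublist (List.filter_sublist.map Prod.fst) hg
  apply PySem.Dict.ext
  have hA := pv_foldA (fun k => ((PySem.Dict.mk graph).getD k []).contains c) infl1.items []
    (by simp only [List.nil_append]; exact h1)
  simp only [List.nil_append] at hA
  have hmk : PySem.Dict.mk infl1.items = infl1 := rfl
  rw [hmk] at hA
  rw [hA, pv_foldB _ _ hRnd h1]
  apply List.map_congr_left
  intro p hp
  have hpk : p.1 ∈ infl1.keys := List.mem_map_of_mem hp
  have hmem := pv_mem_rev graph hg p.1 (hsub p.1 hpk) c
  by_cases hq : (((PySem.Dict.mk graph).getD p.1 []).contains c) = true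
  · have : ((pvRev graph).getD c []).contains p.1 = true := by
      rw [hR]
      exact List.contains_iff_mem.mpr (hmem.mpr (List.contains_iff_mem.mp hq))
    rw [if_pos hq, if_pos this]
  · have : ((pvRev graph).getD c []).contains p.1 = false := by
      rw [hR]
      refine Bool.eq_false_iff.mpr (fun hcon => hq ?_)
      exact List.contains_iff_mem.mpr (hmem.mp (List.contains_iff_mem.mp hcon))
    rw [if_neg hq, if_neg (by rw [this]; exact Bool.false_ne_true)]

lemma pv_loop_eq (graph : List (Int × List Int)) (hg : (graph.map Prod.fst).Nodup) :
    ∀ (fuel : Nat) (infl : PySem.Dict Int Int), infl.keys.Nodup →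
      (∀ k ∈ infl.keys, k ∈ graph.map Prod.fst) →
      pvLoopA ⟨graph⟩ fuel infl = pvLoopB (pvRev graph) (pvDeg graph) fuel infl := by
  intro fuel
  induction fuel with
  | zero => intro infl _ _; rfl
  | succ fuel ih =>
    intro infl hnd hsub
    have hvals : ∀ kv ∈ infl.items, infl.getD kv.1 0 = kv.2 ∧
        (pvDeg graph).getD kv.1 0 = (((PySem.Dict.mk graph).getD kv.1 []).length : Int) := by
      intro kv hkv
      refine ⟨PySem.Dict.getD_of_mem_items infl (by exact hkv) hnd 0, ?_⟩
      exact pv_deg_getD graph hg kv.1 (hsub kv.1 (List.mem_map_of_mem hkv))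
    have hkeys : infl.keys = infl.items.map Prod.fst := rfl
    have hcand := pv_cand_aux graph infl infl.items hvals
    rw [pvLoopA, pvLoopB]
    simp only [hkeys, hcand]
    cases hcc : infl.items.filterMap (fun kv =>
        if 0 ≤ kv.2 then some (kv.2, (pvDeg graph).getD kv.1 0, kv.1) else none) with
    | nil => rfl
    | cons c0 rest =>
      simp only [pvMinTriple?, pv_min_eq]
      -- the selected minimum
      set com := rest.foldl (fun m t => if pvTripleLt t m then t else m) c0 with hcom
      have hcmem : com ∈ c0 :: rest := pv_foldl_min_mem rest c0
      have hckey : com.2.2 ∈ infl.keys := by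
        rw [← hcc] at hcmem
        obtain ⟨kv, hkv, hkv2⟩ := List.mem_filterMap.mp hcmem
        by_cases h0 : 0 ≤ kv.2
        · rw [if_pos h0] at hkv2
          have h3 := Option.some.inj hkv2
          rw [← h3]
          exact List.mem_map_of_mem hkv
        · rw [if_neg h0] at hkv2
          exact absurd hkv2 (by simp)
      -- the dict after erase
      have h1nd : (infl.erase com.2.2).keys.Nodup := by
        have : (infl.erase com.2.2).keys.Sublist infl.keys :=
          List.filter_sublist.map Prod.fst
        exact List.Nodup.sublist this hnd
      have h1sub : ∀ k ∈ (infl.erase com.2.2).keys, k ∈ graph.map Prod.fst := by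
        intro k hk
        obtain ⟨p, hpmem, hpe⟩ := List.mem_map.mp hk
        exact hsub k (hpe ▸ List.mem_map_of_mem (List.mem_of_mem_filter hpmem))
      have hdec := pv_dec_eq graph hg (infl.erase com.2.2) h1nd h1sub com.2.2
      rw [hdec]
      -- the invariants for the next state
      have hitems2 := pv_foldB ((pvRev graph).getD com.2.2 []) (infl.erase com.2.2)
        (by
          rw [pv_rev_getD graph com.2.2]
          exact List.Nodup.sublist (List.filter_sublist.map Prod.fst) hg) h1nd
      have hkeys2 : (((pvRev graph).getD com.2.2 []).foldl
          (fun d j => if d.contains j then d.modify j 0 (fun v => v - 1) else d)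
          (infl.erase com.2.2)).keys = (infl.erase com.2.2).keys := by
        unfold PySem.Dict.keys
        rw [hitems2, List.map_map]
        apply List.map_congr_left
        intro p _
        by_cases hpj : ((pvRev graph).getD com.2.2 []).contains p.1 = true
        · simp only [Function.comp_apply, if_pos hpj]
        · simp only [Function.comp_apply, if_neg hpj]
      exact ih _ (by rw [hkeys2]; exact h1nd) (by rw [hkeys2]; exact h1sub)

-- ===== VERDICT (by name: the statement is the Claim_ definition above) =====
theorem find_influencers_spec : Claim_equal_find_influencers := by
  unfold Claim_equal_find_influencers
  intro graph _ hpre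
  have hg : (graph.map Prod.fst).Nodup := hpre
  unfold Spec_find_influencers find_influencers find_influencers_alt
  show pvLoopA ⟨graph⟩ ((pvInflA graph).items.length + 1) (pvInflA graph)
      = pvLoopB (pvRev graph) (pvDeg graph) ((pvInflB graph).items.length + 1) (pvInflB graph)
  rw [pv_infl_eq]
  have hkeys : (pvInflB graph).keys = graph.map Prod.fst := by
    show (pvInflB graph).items.map _ = _
    rw [pv_inflB_items graph hg, List.map_map]
    rfl
  exact pv_loop_eq graph hg _ (pvInflB graph) (by rw [hkeys]; exact hg)
    (by rw [hkeys]; exact fun k hk => hk)
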